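-- pv_equiv track=rewrite | github.com/romulusae/romulus | Implementations/software/python/ROMULUS_N_AEAD.py | increase_counter
-- ===== SOURCE A (Python) =====
-- COUNTER_LENGTH = 7
--
-- def increase_counter(counter):
--     if COUNTER_LENGTH == 6:
--         if counter[2] & 0x80 != 0:
--             mask = 0x1b
--         else:
--             mask = 0
--         for i in reversed(range(1, 2)):
--             counter[i] = ((counter[i] << 1) & 0xfe) ^ (counter[i - 1] >> 7)
--         counter[0] = ((counter[0] << 1) & 0xfe) ^ mask
--         if counter[0] == 1 and counter[1] == 0 and counter[2] == 0:
--             if counter[3] & 0x80 != 0: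
--                 mask = 0x1b
--             else:
--                 mask = 0
--             for i in reversed(range(1, 3)):
--                 counter[i + 3] = ((counter[i + 3] << 1) & 0xfe) ^ (counter[3 + i - 1] >> 7)
--             counter[3] = ((counter[3] << 1) & 0xfe) ^ mask
--     elif COUNTER_LENGTH in [3, 7]:
--         if counter[COUNTER_LENGTH - 1] & 0x80 != 0:
--             if COUNTER_LENGTH == 7:
--                 mask = 0x95
--             elif COUNTER_LENGTH == 3:
--                 mask = 0x1b
--         else:
--             mask = 0
--         for i in reversed(range(1, COUNTER_LENGTH)):
--             counter[i] = ((counter[i] << 1) & 0xfe) ^ (counter[i - 1] >> 7)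
--         counter[0] = ((counter[0] << 1) & 0xfe) ^ mask
--     return counter
-- ===== SOURCE B (Python) =====
-- COUNTER_LENGTH = 7
--
-- def increase_counter(counter):
--     # Forward carry-threading recursion instead of the backward in-place index
--     # loop: walk the bytes least-significant first, feeding each element the
--     # carry bit taken from its predecessor; the LFSR feedback mask enters as
--     # the initial carry of the recursion.
--     def shifted(bytes7, carry):
--         if not bytes7:
--             return []
--         x = bytes7[0]
--         return [((x << 1) & 0xfe) ^ carry] + shifted(bytes7[1:], x >> 7)
--
--     feedback = 0x95 if counter[COUNTER_LENGTH - 1] & 0x80 != 0 else 0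
--     counter[:COUNTER_LENGTH] = shifted(counter[:COUNTER_LENGTH], feedback)
--     return counter
-- ===== Notes on version B (the rewrite author's own statement) =====
-- stated objective: simpler
-- what changed: Replaces the backward in-place indexed loop (counter[i] overwritten from counter[i-1], highest index first, plus dead branches for other counter lengths) by a forward structural recursion that threads the carry bit as an accumulator, with the LFSR feedback mask entering as the initial carry; the result is spliced in with one slice assignment.
import Mathlib
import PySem

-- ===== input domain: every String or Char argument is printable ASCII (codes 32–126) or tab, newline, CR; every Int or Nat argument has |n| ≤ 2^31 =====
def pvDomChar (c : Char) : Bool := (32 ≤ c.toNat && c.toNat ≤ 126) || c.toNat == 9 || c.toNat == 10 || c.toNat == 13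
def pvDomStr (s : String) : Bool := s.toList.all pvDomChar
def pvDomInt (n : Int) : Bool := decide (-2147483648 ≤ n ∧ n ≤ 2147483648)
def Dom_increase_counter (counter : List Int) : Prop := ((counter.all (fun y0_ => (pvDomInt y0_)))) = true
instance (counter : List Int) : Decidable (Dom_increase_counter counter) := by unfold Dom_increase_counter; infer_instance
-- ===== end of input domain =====

-- B replaces A's backward in-place indexed loop by a forward recursion that threads
-- the carry bit as an accumulator (objective: simpler). Both A and B mutate the
-- argument list in place; the equivalence proved here is about the returned value
-- (which is that same list).

-- ===== PORT A =====
def COUNTER_LENGTH : Int := 7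

-- loop body of 'for i in reversed(range(1, COUNTER_LENGTH)): counter[i] = ((counter[i] << 1) & 0xfe) ^ (counter[i - 1] >> 7)'
def icStep (c : List Int) (i : Int) : List Int :=
  PySem.List.pySetD c i
    (PySem.Int.bxor (PySem.Int.band (PySem.List.pyGetD c i 0 <<< (1 : Nat)) 0xfe)
      (PySem.List.pyGetD c (i - 1) 0 >>> (7 : Nat)))

def increase_counter (counter : List Int) : List Int :=
  if COUNTER_LENGTH = 6 then
    -- dead branch under the module constant COUNTER_LENGTH = 7; ported step for step
    let mask : Int :=
      if PySem.Int.band (PySem.List.pyGetD counter 2 0) 0x80 ≠ 0 then 0x1b else 0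
    let c := ((PySem.List.pyRange 1 2 1).reverse).foldl icStep counter
    let c := PySem.List.pySetD c 0
      (PySem.Int.bxor (PySem.Int.band (PySem.List.pyGetD c 0 0 <<< (1 : Nat)) 0xfe) mask)
    if PySem.List.pyGetD c 0 0 = 1 ∧ PySem.List.pyGetD c 1 0 = 0 ∧ PySem.List.pyGetD c 2 0 = 0 then
      let mask : Int :=
        if PySem.Int.band (PySem.List.pyGetD c 3 0) 0x80 ≠ 0 then 0x1b else 0
      let c := ((PySem.List.pyRange 1 3 1).reverse).foldl
        (fun c i => PySem.List.pySetD c (i + 3)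
          (PySem.Int.bxor (PySem.Int.band (PySem.List.pyGetD c (i + 3) 0 <<< (1 : Nat)) 0xfe)
            (PySem.List.pyGetD c (3 + i - 1) 0 >>> (7 : Nat)))) c
      PySem.List.pySetD c 3
        (PySem.Int.bxor (PySem.Int.band (PySem.List.pyGetD c 3 0 <<< (1 : Nat)) 0xfe) mask)
    else c
  else if COUNTER_LENGTH = 3 ∨ COUNTER_LENGTH = 7 then
    let mask : Int :=
      if PySem.Int.band (PySem.List.pyGetD counter (COUNTER_LENGTH - 1) 0) 0x80 ≠ 0 then
        (if COUNTER_LENGTH = 7 then 0x95 else if COUNTER_LENGTH = 3 then 0x1b else 0)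
      else 0
    let c := ((PySem.List.pyRange 1 COUNTER_LENGTH 1).reverse).foldl icStep counter
    PySem.List.pySetD c 0
      (PySem.Int.bxor (PySem.Int.band (PySem.List.pyGetD c 0 0 <<< (1 : Nat)) 0xfe) mask)
  else counter

-- ===== PORT B =====
-- helper 'shifted(bytes7, carry)': forward recursion threading the carry bit
def shiftedBytes : List Int → Int → List Int
  | [], _ => []
  | x :: rest, carry =>
      (PySem.Int.bxor (PySem.Int.band (x <<< (1 : Nat)) 0xfe) carry) :: shiftedBytes rest (x >>> (7 : Nat))

def increase_counter_alt (counter : List Int) : List Int :=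
  -- feedback = 0x95 if counter[6] & 0x80 != 0 else 0
  let feedback : Int :=
    if PySem.Int.band (PySem.List.pyGetD counter (COUNTER_LENGTH - 1) 0) 0x80 ≠ 0 then 0x95 else 0
  -- counter[:7] = shifted(counter[:7], feedback)  (len(counter) ≥ 7 under Pre_,
  -- and shifted returns as many elements as it is given)
  shiftedBytes (PySem.List.slice counter none (some COUNTER_LENGTH)) feedback ++ counter.drop 7

-- ===== PRECONDITION & SPEC =====
-- Pre_: A reads byte index 6 for the feedback test (and indices 1..6 in its loop),
-- so any list shorter than 7 raises IndexError; nothing else is excluded.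
def Pre_increase_counter (counter : List Int) : Prop := 7 ≤ counter.length
instance (counter : List Int) : Decidable (Pre_increase_counter counter) := by
  unfold Pre_increase_counter; infer_instance

def pvWitness_increase_counter : List Int := [1, 2, 3, 4, 5, 6, 200]

def Spec_increase_counter (counter : List Int) (out : List Int) : Prop := out = increase_counter_alt counter
instance (counter : List Int) (out : List Int) : Decidable (Spec_increase_counter counter out) := by unfold Spec_increase_counter; infer_instance

-- ===== CLAIM (what is proved, stated in full; the proofs are below) =====
def Claim_equal_increase_counter : Prop := ∀ (counter : List Int), Dom_increase_counter counter → Pre_increase_counter counter → Spec_increase_counter counter (increase_counter counter)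

-- ===== LEMMAS AND PROOFS =====

-- new value of byte i from old bytes i-1, i (A's loop body value); proof abbreviation
def icF (x y : Int) : Int :=
  PySem.Int.bxor (PySem.Int.band (y <<< (1 : Nat)) 0xfe) (x >>> (7 : Nat))

-- ===== VERDICT (by name: the statement is the Claim_ definition above) =====
set_option maxHeartbeats 1600000 in
theorem increase_counter_spec : Claim_equal_increase_counter := by
  intro counter _ hpre
  unfold Pre_increase_counter at hpre
  match counter, hpre with
  | a :: b :: c :: d :: e :: f :: g :: t, _ =>
    show increase_counter _ = increase_counter_alt _
    -- ---- reduce A to an explicit 7-byte list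
    have hr : ((PySem.List.pyRange 1 7 1).reverse) = ([6, 5, 4, 3, 2, 1] : List Int) := by decide
    have s6 : icStep (a :: b :: c :: d :: e :: f :: g :: t) 6
        = a :: b :: c :: d :: e :: f :: icF f g :: t := by
      simp [icStep, icF, pysem]
    have s5 : icStep (a :: b :: c :: d :: e :: f :: icF f g :: t) 5
        = a :: b :: c :: d :: e :: icF e f :: icF f g :: t := by
      simp [icStep, icF, pysem]
    have s4 : icStep (a :: b :: c :: d :: e :: icF e f :: icF f g :: t) 4
        = a :: b :: c :: d :: icF d e :: icF e f :: icF f g :: t := by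
      simp [icStep, icF, pysem]
    have s3 : icStep (a :: b :: c :: d :: icF d e :: icF e f :: icF f g :: t) 3
        = a :: b :: c :: icF c d :: icF d e :: icF e f :: icF f g :: t := by
      simp [icStep, icF, pysem]
    have s2 : icStep (a :: b :: c :: icF c d :: icF d e :: icF e f :: icF f g :: t) 2
        = a :: b :: icF b c :: icF c d :: icF d e :: icF e f :: icF f g :: t := by
      simp [icStep, icF, pysem]
    have s1 : icStep (a :: b :: icF b c :: icF c d :: icF d e :: icF e f :: icF f g :: t) 1
        = a :: icF a b :: icF b c :: icF c d :: icF d e :: icF e f :: icF f g :: t := by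
      simp [icStep, icF, pysem]
    have hA : increase_counter (a :: b :: c :: d :: e :: f :: g :: t)
        = (PySem.Int.bxor (PySem.Int.band (a <<< (1 : Nat)) 0xfe)
            (if PySem.Int.band g 0x80 ≠ 0 then 0x95 else 0)) ::
          icF a b :: icF b c :: icF c d :: icF d e :: icF e f :: icF f g :: t := by
      simp only [increase_counter, COUNTER_LENGTH]
      rw [hr]
      simp only [List.foldl, s6, s5, s4, s3, s2, s1]
      simp [pysem]
    rw [hA]
    -- ---- reduce B: unfold the recursion on the 7-element slice
    have hslice : PySem.List.slice (a :: b :: c :: d :: e :: f :: g :: t) none (some (7:Int))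
        = [a, b, c, d, e, f, g] := by
      rw [show (7:Int) = ((7:Nat):Int) by norm_num, PySem.List.slice_to_natCast]
      norm_num [List.take]
    simp only [increase_counter_alt, COUNTER_LENGTH]
    norm_num only []
    rw [hslice]
    simp [shiftedBytes, icF, pysem, List.drop]
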